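-- pv_equiv track=rewrite | github.com/Yawn-Sean/Daily_CF_Problems | daily_problems/2025/09/0912/personal_submission/cf100384h_liryc.py | solve
-- ===== SOURCE A (Python) =====
-- def solve(n: int) -> str:
--     a = [0] * n
--     i, d, x = 1, 2, 0
--     while i <= n:
--         for j in range(i - 1, n, d):
--             a[j] = x
--         i, d, x = i << 1, d << 1, x + 1
--     return ''.join(chr(x + 97) for x in a)
-- ===== SOURCE B (Python) =====
-- def solve(n: int) -> str:
--     out = []
--     for j in range(n):
--         m = j + 1
--         tz = 0
--         while m % 2 == 0:
--             m //= 2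
--             tz += 1
--         out.append(chr(tz + 97))
--     return ''.join(out)
-- ===== Notes on version B (the rewrite author's own statement) =====
-- stated objective: simpler
-- what changed: A fills the array level by level with strided overwrites (all multiples of 2^x positions per pass); B makes a single pass computing each character independently as the trailing-zero count of j+1 via a small divide-by-2 loop.
import Mathlib
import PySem

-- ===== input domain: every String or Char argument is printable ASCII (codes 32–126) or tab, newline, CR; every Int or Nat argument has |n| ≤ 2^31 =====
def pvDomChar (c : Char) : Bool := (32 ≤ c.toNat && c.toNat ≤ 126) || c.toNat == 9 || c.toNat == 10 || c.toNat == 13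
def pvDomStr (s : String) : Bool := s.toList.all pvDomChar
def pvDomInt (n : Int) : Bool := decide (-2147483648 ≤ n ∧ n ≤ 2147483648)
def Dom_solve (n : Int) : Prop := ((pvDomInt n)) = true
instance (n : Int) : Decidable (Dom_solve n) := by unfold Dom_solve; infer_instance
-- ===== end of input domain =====

-- B replaces A's level-by-level strided overwrites with one pass that computes each
-- character's trailing-zero count independently (objective: simpler).

-- ===== PORT A =====
-- the while loop: i doubles each round; the '0 < i' conjunct is a totality guard only
-- (i starts at 1 and only doubles, so it is always true on the executed path)
def solveLoop (n : Int) (a : List Int) (i d x : Int) : List Int :=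
  if h : 0 < i ∧ i ≤ n then
    solveLoop n
      ((PySem.List.pyRange (i - 1) n d).foldl (fun acc j => acc.set j.toNat x) a)
      (i * 2) (d * 2) (x + 1)
  else a
termination_by (n + 1 - i).toNat
decreasing_by omega

-- chr(x + 97): Char.ofNat is exact here (every written x is a small nonnegative count)
def solve (n : Int) : String :=
  String.mk ((solveLoop n (List.replicate n.toNat 0) 1 2 0).map
    (fun x => Char.ofNat (x + 97).toNat))

-- ===== PORT B =====
-- the inner 'while m % 2 == 0: m //= 2; tz += 1' loop ('0 < m' is a totality guard;
-- every call has m ≥ 1)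
def tzLoop (m tz : Int) : Int :=
  if h : 0 < m ∧ PySem.Int.mod m 2 = 0 then tzLoop (PySem.Int.floordiv m 2) (tz + 1) else tz
termination_by m.toNat
decreasing_by
  rw [PySem.Int.floordiv_eq_ediv_of_pos (by omega)]
  omega

def solve_alt (n : Int) : String :=
  String.mk ((PySem.List.pyRange 0 n 1).map
    (fun j => Char.ofNat (tzLoop (j + 1) 0 + 97).toNat))

-- ===== PRECONDITION & SPEC =====
def Spec_solve (n : Int) (out : String) : Prop := out = solve_alt n
instance (n : Int) (out : String) : Decidable (Spec_solve n out) := by unfold Spec_solve; infer_instance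

-- ===== CLAIM (what is proved, stated in full; the proofs are below) =====
def Claim_equal_solve : Prop := ∀ (n : Int), Dom_solve n → Spec_solve n (solve n)

-- ===== LEMMAS AND PROOFS =====

theorem foldl_set_length (l : List Int) (a : List Int) (v : Int) :
    (l.foldl (fun acc j => acc.set j.toNat v) a).length = a.length := by
  induction l generalizing a with
  | nil => rfl
  | cons j l ih => simpa [List.foldl_cons] using ih (a.set j.toNat v)

theorem foldl_set_getElem? (l : List Int) (a : List Int) (v : Int) (k : Nat) :
    (l.foldl (fun acc j => acc.set j.toNat v) a)[k]?
      = if (∃ j ∈ l, j.toNat = k) ∧ k < a.length then some v else a[k]? := by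
  induction l generalizing a with
  | nil => simp
  | cons j l ih =>
    rw [List.foldl_cons, ih (a.set j.toNat v), List.length_set]
    by_cases hk : k < a.length
    · by_cases ht : ∃ j' ∈ l, j'.toNat = k
      · rw [if_pos ⟨ht, hk⟩,
          if_pos ⟨⟨ht.choose, List.mem_cons_of_mem _ ht.choose_spec.1, ht.choose_spec.2⟩, hk⟩]
      · rw [if_neg (fun hc => ht hc.1)]
        by_cases hj : j.toNat = k
        · rw [if_pos ⟨⟨j, List.mem_cons_self, hj⟩, hk⟩, ← hj,
            List.getElem?_set_self (by omega)]
        · rw [List.getElem?_set_ne hj, if_neg]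
          rintro ⟨⟨j', hj', rfl⟩, -⟩
          rcases List.mem_cons.mp hj' with rfl | hj''
          · exact hj rfl
          · exact ht ⟨j', hj'', rfl⟩
    · rw [if_neg (fun hc => hk hc.2), if_neg (fun hc => hk hc.2),
        List.getElem?_eq_none (by simp; omega), List.getElem?_eq_none (by omega)]

-- the indices written by level x are exactly those k with v₂(k+1) = x
theorem level_writes (n : Int) (x : Nat) (k : Nat) (hk : (k : Int) < n) :
    (∃ j ∈ PySem.List.pyRange ((2:Int)^x - 1) n (2^(x+1)), j.toNat = k) ↔
      ((2:Int)^x ∣ (k + 1) ∧ ¬ (2:Int)^(x+1) ∣ (k + 1)) := by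
  have hpow : (0:Int) < 2^x := by positivity
  have hpow1 : (0:Int) < 2^(x+1) := by positivity
  constructor
  · rintro ⟨j, hj, rfl⟩
    rw [PySem.List.mem_pyRange_iff_of_pos hpow1] at hj
    obtain ⟨h1, h2, c, hc⟩ := hj
    have hj0 : 0 ≤ j := by omega
    have hj' : (j.toNat : Int) = j := Int.toNat_of_nonneg hj0
    rw [hj']
    have hkey : j + 1 = 2^x + 2^(x+1) * c := by
      rw [pow_succ] at hc ⊢; omega
    constructor
    · exact ⟨1 + 2 * c, by rw [hkey, pow_succ]; ring⟩
    · rintro ⟨e, he⟩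
      have : (2:Int)^(x+1) ∣ 2^x := ⟨e - c, by rw [mul_sub]; omega⟩
      have hle := Int.le_of_dvd hpow this
      rw [pow_succ] at hle; omega
  · rintro ⟨⟨c, hc⟩, h2⟩
    have hc0 : 0 < c := by nlinarith
    have hodd : ¬ (2:Int) ∣ c := by
      rintro ⟨e, rfl⟩
      exact h2 ⟨e, by rw [hc, pow_succ]; ring⟩
    have hc1 : ∃ e, c = 2 * e + 1 := ⟨(c - 1) / 2, by omega⟩
    obtain ⟨e, rfl⟩ := hc1
    refine ⟨(k : Int), ?_, by simp⟩
    rw [PySem.List.mem_pyRange_iff_of_pos hpow1]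
    refine ⟨?_, hk, e, ?_⟩
    · nlinarith
    · rw [pow_succ]; nlinarith

-- B's inner loop: shifting the accumulator
theorem tzLoop_shift (fuel : Nat) : ∀ (m t : Int), m.toNat ≤ fuel →
    tzLoop m t = tzLoop m 0 + t := by
  induction fuel with
  | zero =>
    intro m t hm
    rw [tzLoop, dif_neg (by rintro ⟨h1, -⟩; omega)]
    conv_rhs => rw [tzLoop]
    rw [dif_neg (by rintro ⟨h1, -⟩; omega)]
    ring
  | succ f ih =>
    intro m t hm
    by_cases h : 0 < m ∧ PySem.Int.mod m 2 = 0
    · have hlt : (PySem.Int.floordiv m 2).toNat ≤ f := by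
        rw [PySem.Int.floordiv_eq_ediv_of_pos (by omega)]; omega
      rw [tzLoop, dif_pos h]
      conv_rhs => rw [tzLoop]
      rw [dif_pos h, ih (PySem.Int.floordiv m 2) (t+1) hlt,
        ih (PySem.Int.floordiv m 2) (0+1) hlt]
      ring
    · rw [tzLoop, dif_neg h]
      conv_rhs => rw [tzLoop]
      rw [dif_neg h]
      ring

-- B's loop computes the 2-adic valuation
theorem tzLoop_eq (x : Nat) : ∀ (m : Int), 0 < m → (2:Int)^x ∣ m → ¬ (2:Int)^(x+1) ∣ m →
    tzLoop m 0 = (x : Int) := by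
  induction x with
  | zero =>
    intro m hm _ h2
    rw [tzLoop, dif_neg]
    · simp
    · rintro ⟨-, hmod⟩
      rw [PySem.Int.mod_eq_zero_iff_dvd] at hmod
      exact h2 (by simpa using hmod)
  | succ x ih =>
    intro m hm h1 h2
    have hdvd2 : (2:Int) ∣ m := dvd_trans ⟨2^x, by rw [pow_succ]; ring⟩ h1
    rw [tzLoop, dif_pos ⟨hm, by rw [PySem.Int.mod_eq_zero_iff_dvd]; exact hdvd2⟩]
    obtain ⟨c, hc⟩ := hdvd2
    have hfd : PySem.Int.floordiv m 2 = c := by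
      rw [PySem.Int.floordiv_eq_ediv_of_pos (by omega), hc, mul_comm,
        Int.mul_ediv_cancel _ (by omega)]
    rw [hfd, zero_add, tzLoop_shift c.toNat c 1 le_rfl]
    have hcx1 : (2:Int)^x ∣ c := by
      obtain ⟨e, he⟩ := h1
      refine ⟨e, ?_⟩
      have h2c : 2 * c = 2 * (2^x * e) := by rw [← hc, he, pow_succ]; ring
      linarith
    have hcx2 : ¬ (2:Int)^(x+1) ∣ c := by
      rintro ⟨e, he⟩
      exact h2 ⟨e, by rw [pow_succ (2:Int) (x+1), hc, he]; ring⟩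
    rw [ih c (by omega) hcx1 hcx2]
    push_cast; ring

-- the main invariant: from level x on, the loop fills in exactly the entries whose
-- 2-adic valuation is ≥ x, with B's value
theorem loop_char (t : Nat) : ∀ (n : Int) (x : Nat) (a : List Int),
    n < 2^(x + t) → a.length = n.toNat →
    (solveLoop n a (2^x) (2^(x+1)) (x : Int)).length = n.toNat ∧
    ∀ k : Nat, (k : Int) < n →
      (solveLoop n a (2^x) (2^(x+1)) (x : Int))[k]?
        = if (2:Int)^x ∣ (k + 1) then some (tzLoop (k + 1) 0) else a[k]? := by
  induction t with
  | zero =>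
    intro n x a hn ha
    have hn' : n < 2^x := by simpa using hn
    have hstop : ¬ (0 < (2:Int)^x ∧ (2:Int)^x ≤ n) := by
      rintro ⟨-, hle⟩; omega
    rw [solveLoop, dif_neg hstop]
    refine ⟨ha, fun k hkn => ?_⟩
    rw [if_neg]
    intro hdvd
    have := Int.le_of_dvd (by omega) hdvd
    omega
  | succ t ih =>
    intro n x a hn ha
    by_cases hgo : 0 < (2:Int)^x ∧ (2:Int)^x ≤ n
    · rw [solveLoop, dif_pos hgo]
      set a' := (PySem.List.pyRange ((2:Int)^x - 1) n (2^(x+1))).foldl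
        (fun acc j => acc.set j.toNat (x : Int)) a with ha'
      have hlen' : a'.length = n.toNat := by rw [ha', foldl_set_length, ha]
      have harg1 : (2:Int)^x * 2 = 2^(x+1) := (pow_succ 2 x).symm
      have harg2 : (2:Int)^(x+1) * 2 = 2^(x+1+1) := (pow_succ 2 (x+1)).symm
      have harg3 : ((x : Int) + 1) = ((x + 1 : Nat) : Int) := by push_cast; ring
      rw [harg1, harg2, harg3]
      have hn' : n < 2^((x+1) + t) := by
        have hxt : x + 1 + t = x + (t + 1) := by omega
        rw [hxt]; exact hn
      obtain ⟨hlih, hih⟩ := ih n (x+1) a' hn' hlen'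
      refine ⟨hlih, fun k hkn => ?_⟩
      have hkA : k < a.length := by omega
      rw [hih k hkn]
      have hget' : a'[k]? = if (2:Int)^x ∣ (k + 1) ∧ ¬ (2:Int)^(x+1) ∣ (k + 1)
          then some ((x : Int)) else a[k]? := by
        rw [ha', foldl_set_getElem?]
        by_cases hw : ∃ j ∈ PySem.List.pyRange ((2:Int)^x - 1) n (2^(x+1)), j.toNat = k
        · rw [if_pos ⟨hw, hkA⟩, if_pos ((level_writes n x k hkn).mp hw)]
        · rw [if_neg (fun hc => hw hc.1),
            if_neg (fun hc => hw ((level_writes n x k hkn).mpr hc))]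
      by_cases h1 : (2:Int)^(x+1) ∣ (k + 1)
      · rw [if_pos h1, if_pos (dvd_trans (pow_dvd_pow 2 (by omega)) h1)]
      · rw [if_neg h1, hget']
        by_cases h2 : (2:Int)^x ∣ (k + 1)
        · rw [if_pos ⟨h2, h1⟩, if_pos h2, tzLoop_eq x ((k:Int)+1) (by omega) h2 h1]
        · rw [if_neg (fun hc => h2 hc.1), if_neg h2]
    · rw [solveLoop, dif_neg hgo]
      have h1 : (0:Int) < 2^x := by positivity
      have hle : n < 2^x := by
        rcases not_and_or.mp hgo with hc | hc
        · exact absurd h1 hc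
        · omega
      refine ⟨ha, fun k hkn => ?_⟩
      rw [if_neg]
      intro hdvd
      have := Int.le_of_dvd (by omega) hdvd
      omega

-- ===== VERDICT (by name: the statement is the Claim_ definition above) =====
theorem solve_spec : Claim_equal_solve := by
  unfold Claim_equal_solve Spec_solve
  intro n hdom
  have hn32 : n < 2^((0:Nat) + 32) := by
    simp only [Dom_solve, pvDomInt, decide_eq_true_eq] at hdom
    norm_num
    omega
  obtain ⟨hlen, hch⟩ := loop_char 32 n 0 (List.replicate n.toNat 0) hn32 (by simp)
  norm_num at hch hlen
  unfold solve solve_alt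
  congr 1
  rw [PySem.List.pyRange_one]
  apply List.ext_getElem?
  intro k
  simp only [List.getElem?_map]
  by_cases hk : k < n.toNat
  · have hkn : (k : Int) < n := by omega
    rw [hch k hkn, List.getElem?_range (by simpa using hk)]
    simp
  · rw [List.getElem?_eq_none (by omega), List.getElem?_eq_none (by simp; omega)]
    simp
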